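-- pv_equiv track=rewrite | github.com/milanvibes18/digital-bl | Digital_Twin/WEB_APPLICATION/enhanced_flask_app_v2.py | calculate_status_distribution
-- ===== SOURCE A (Python) =====
-- def calculate_status_distribution(devices_data):
--     """Calculate device status distribution"""
--     status_counts = {'normal': 0, 'warning': 0, 'critical': 0, 'offline': 0}
--     for device in devices_data:
--         status = device.get('status', 'normal')
--         if status in status_counts:
--             status_counts[status] += 1
--         else:
--             # Map unknown statuses
--             if status == 'anomaly':
--                 status_counts['critical'] += 1
--             else:
--                 status_counts['normal'] += 1
--     return status_counts
-- ===== SOURCE B (Python) =====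
-- def calculate_status_distribution(devices_data):
--     """Calculate device status distribution"""
--     statuses = [device.get('status', 'normal') for device in devices_data]
--     warning = statuses.count('warning')
--     critical = statuses.count('critical') + statuses.count('anomaly')
--     offline = statuses.count('offline')
--     return {'normal': len(statuses) - warning - critical - offline,
--             'warning': warning, 'critical': critical, 'offline': offline}
-- ===== Notes on version B (the rewrite author's own statement) =====
-- stated objective: alternative
-- what changed: Instead of one loop incrementing a prepopulated dict with if/elif branch logic, B extracts the status list and computes each bucket by counting passes (warning/critical+anomaly/offline), deriving 'normal' by subtraction from the total, then builds the result dict directly.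
import Mathlib
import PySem

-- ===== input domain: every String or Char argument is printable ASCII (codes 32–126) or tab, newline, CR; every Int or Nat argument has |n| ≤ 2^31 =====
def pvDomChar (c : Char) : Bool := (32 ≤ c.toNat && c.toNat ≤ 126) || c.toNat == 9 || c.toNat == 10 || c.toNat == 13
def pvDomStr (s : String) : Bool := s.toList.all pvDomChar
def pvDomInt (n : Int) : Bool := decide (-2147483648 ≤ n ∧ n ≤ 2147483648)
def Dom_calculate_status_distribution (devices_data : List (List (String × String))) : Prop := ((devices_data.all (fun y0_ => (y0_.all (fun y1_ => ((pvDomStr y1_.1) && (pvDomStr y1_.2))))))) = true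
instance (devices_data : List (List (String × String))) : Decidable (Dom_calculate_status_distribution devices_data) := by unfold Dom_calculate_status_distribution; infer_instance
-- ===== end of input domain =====

-- B replaces A's single counting loop with branch logic by staged counting passes over the
-- extracted status list, deriving the 'normal' bucket by subtraction; same O(n) cost, different decomposition.

-- ===== PORT A =====
def calculate_status_distribution (devices_data : List (List (String × String))) : List (String × Int) :=
  (devices_data.foldl
    (fun status_counts device =>
      let status := (PySem.Dict.mk device).getD "status" "normal"
      if status_counts.contains status then
        status_counts.modify status 0 (· + 1)
      else
        if status = "anomaly" then
          status_counts.modify "critical" 0 (· + 1)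
        else
          status_counts.modify "normal" 0 (· + 1))
    (PySem.Dict.mk [("normal", 0), ("warning", 0), ("critical", 0), ("offline", 0)])).items

-- ===== PORT B =====
def calculate_status_distribution_alt (devices_data : List (List (String × String))) : List (String × Int) :=
  let statuses := devices_data.map (fun device => (PySem.Dict.mk device).getD "status" "normal")
  let warning : Int := PySem.List.count statuses "warning"
  let critical : Int := PySem.List.count statuses "critical" + PySem.List.count statuses "anomaly"
  let offline : Int := PySem.List.count statuses "offline"
  [("normal", (statuses.length : Int) - warning - critical - offline),
   ("warning", warning), ("critical", critical), ("offline", offline)]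

-- ===== PRECONDITION & SPEC =====
def Spec_calculate_status_distribution (devices_data : List (List (String × String))) (out : List (String × Int)) : Prop := out = calculate_status_distribution_alt devices_data
instance (devices_data : List (List (String × String))) (out : List (String × Int)) : Decidable (Spec_calculate_status_distribution devices_data out) := by unfold Spec_calculate_status_distribution; infer_instance

-- ===== CLAIM (what is proved, stated in full; the proofs are below) =====
def Claim_equal_calculate_status_distribution : Prop := ∀ (devices_data : List (List (String × String))), Dom_calculate_status_distribution devices_data → Spec_calculate_status_distribution devices_data (calculate_status_distribution devices_data)

-- ===== LEMMAS AND PROOFS =====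

-- the status a device row contributes
def pvStatus (device : List (String × String)) : String :=
  (PySem.Dict.mk device).getD "status" "normal"

-- closed form of A's counting loop, for an arbitrary accumulator over the four fixed keys
lemma pv_foldA (l : List (List (String × String))) (a b c d : Int) :
    l.foldl
      (fun status_counts device =>
        let status := (PySem.Dict.mk device).getD "status" "normal"
        if status_counts.contains status then
          status_counts.modify status 0 (· + 1)
        else
          if status = "anomaly" then
            status_counts.modify "critical" 0 (· + 1)
          else
            status_counts.modify "normal" 0 (· + 1))
      (PySem.Dict.mk [("normal", a), ("warning", b), ("critical", c), ("offline", d)])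
    = PySem.Dict.mk
        [("normal", a + (l.length : Int) - ((l.map pvStatus).count "warning" : Int)
            - ((l.map pvStatus).count "critical" : Int) - ((l.map pvStatus).count "anomaly" : Int)
            - ((l.map pvStatus).count "offline" : Int)),
         ("warning", b + ((l.map pvStatus).count "warning" : Int)),
         ("critical", c + ((l.map pvStatus).count "critical" : Int) + ((l.map pvStatus).count "anomaly" : Int)),
         ("offline", d + ((l.map pvStatus).count "offline" : Int))] := by
  induction l generalizing a b c d with
  | nil =>
    apply PySem.Dict.ext
    simp
  | cons dev rest ih =>
    simp only [List.foldl_cons]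
    by_cases h1 : (PySem.Dict.mk dev).getD "status" "normal" = "normal"
    · have hs : pvStatus dev = "normal" := h1
      have hstep : (if (PySem.Dict.mk [("normal", a), ("warning", b), ("critical", c), ("offline", d)]).contains ((PySem.Dict.mk dev).getD "status" "normal") = true then
            (PySem.Dict.mk [("normal", a), ("warning", b), ("critical", c), ("offline", d)]).modify ((PySem.Dict.mk dev).getD "status" "normal") 0 (· + 1)
          else if (PySem.Dict.mk dev).getD "status" "normal" = "anomaly" then
            (PySem.Dict.mk [("normal", a), ("warning", b), ("critical", c), ("offline", d)]).modify "critical" 0 (· + 1)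
          else
            (PySem.Dict.mk [("normal", a), ("warning", b), ("critical", c), ("offline", d)]).modify "normal" 0 (· + 1))
          = PySem.Dict.mk [("normal", a + 1), ("warning", b), ("critical", c), ("offline", d)] := by
        rw [h1]; simp [PySem.Dict.contains, PySem.Dict.modify, PySem.Dict.insert, PySem.Dict.getD, PySem.Dict.get?]
      rw [hstep, ih]
      apply PySem.Dict.ext
      simp [hs]
      all_goals omega
    · by_cases h2 : (PySem.Dict.mk dev).getD "status" "normal" = "warning"
      · have hs : pvStatus dev = "warning" := h2
        have hstep : (if (PySem.Dict.mk [("normal", a), ("warning", b), ("critical", c), ("offline", d)]).contains ((PySem.Dict.mk dev).getD "status" "normal") = true then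
            (PySem.Dict.mk [("normal", a), ("warning", b), ("critical", c), ("offline", d)]).modify ((PySem.Dict.mk dev).getD "status" "normal") 0 (· + 1)
          else if (PySem.Dict.mk dev).getD "status" "normal" = "anomaly" then
            (PySem.Dict.mk [("normal", a), ("warning", b), ("critical", c), ("offline", d)]).modify "critical" 0 (· + 1)
          else
            (PySem.Dict.mk [("normal", a), ("warning", b), ("critical", c), ("offline", d)]).modify "normal" 0 (· + 1))
            = PySem.Dict.mk [("normal", a), ("warning", b + 1), ("critical", c), ("offline", d)] := by
          rw [h2]; simp [PySem.Dict.contains, PySem.Dict.modify, PySem.Dict.insert, PySem.Dict.getD, PySem.Dict.get?]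
        rw [hstep, ih]
        apply PySem.Dict.ext
        simp [hs]
        all_goals omega
      · by_cases h3 : (PySem.Dict.mk dev).getD "status" "normal" = "critical"
        · have hs : pvStatus dev = "critical" := h3
          have hstep : (if (PySem.Dict.mk [("normal", a), ("warning", b), ("critical", c), ("offline", d)]).contains ((PySem.Dict.mk dev).getD "status" "normal") = true then
            (PySem.Dict.mk [("normal", a), ("warning", b), ("critical", c), ("offline", d)]).modify ((PySem.Dict.mk dev).getD "status" "normal") 0 (· + 1)
          else if (PySem.Dict.mk dev).getD "status" "normal" = "anomaly" then
            (PySem.Dict.mk [("normal", a), ("warning", b), ("critical", c), ("offline", d)]).modify "critical" 0 (· + 1)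
          else
            (PySem.Dict.mk [("normal", a), ("warning", b), ("critical", c), ("offline", d)]).modify "normal" 0 (· + 1))
              = PySem.Dict.mk [("normal", a), ("warning", b), ("critical", c + 1), ("offline", d)] := by
            rw [h3]; simp [PySem.Dict.contains, PySem.Dict.modify, PySem.Dict.insert, PySem.Dict.getD, PySem.Dict.get?]
          rw [hstep, ih]
          apply PySem.Dict.ext
          simp [hs]
          all_goals omega
        · by_cases h4 : (PySem.Dict.mk dev).getD "status" "normal" = "offline"
          · have hs : pvStatus dev = "offline" := h4
            have hstep : (if (PySem.Dict.mk [("normal", a), ("warning", b), ("critical", c), ("offline", d)]).contains ((PySem.Dict.mk dev).getD "status" "normal") = true then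
            (PySem.Dict.mk [("normal", a), ("warning", b), ("critical", c), ("offline", d)]).modify ((PySem.Dict.mk dev).getD "status" "normal") 0 (· + 1)
          else if (PySem.Dict.mk dev).getD "status" "normal" = "anomaly" then
            (PySem.Dict.mk [("normal", a), ("warning", b), ("critical", c), ("offline", d)]).modify "critical" 0 (· + 1)
          else
            (PySem.Dict.mk [("normal", a), ("warning", b), ("critical", c), ("offline", d)]).modify "normal" 0 (· + 1))
                = PySem.Dict.mk [("normal", a), ("warning", b), ("critical", c), ("offline", d + 1)] := by
              rw [h4]; simp [PySem.Dict.contains, PySem.Dict.modify, PySem.Dict.insert, PySem.Dict.getD, PySem.Dict.get?]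
            rw [hstep, ih]
            apply PySem.Dict.ext
            simp [hs]
            all_goals omega
          · by_cases h5 : (PySem.Dict.mk dev).getD "status" "normal" = "anomaly"
            · have hs : pvStatus dev = "anomaly" := h5
              have hstep : (if (PySem.Dict.mk [("normal", a), ("warning", b), ("critical", c), ("offline", d)]).contains ((PySem.Dict.mk dev).getD "status" "normal") = true then
            (PySem.Dict.mk [("normal", a), ("warning", b), ("critical", c), ("offline", d)]).modify ((PySem.Dict.mk dev).getD "status" "normal") 0 (· + 1)
          else if (PySem.Dict.mk dev).getD "status" "normal" = "anomaly" then
            (PySem.Dict.mk [("normal", a), ("warning", b), ("critical", c), ("offline", d)]).modify "critical" 0 (· + 1)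
          else
            (PySem.Dict.mk [("normal", a), ("warning", b), ("critical", c), ("offline", d)]).modify "normal" 0 (· + 1))
                  = PySem.Dict.mk [("normal", a), ("warning", b), ("critical", c + 1), ("offline", d)] := by
                rw [h5]; simp [PySem.Dict.contains, PySem.Dict.modify, PySem.Dict.insert, PySem.Dict.getD, PySem.Dict.get?]
              rw [hstep, ih]
              apply PySem.Dict.ext
              simp [hs]
              all_goals omega
            · have hs2 : pvStatus dev ≠ "warning" := h2
              have hs3 : pvStatus dev ≠ "critical" := h3
              have hs4 : pvStatus dev ≠ "offline" := h4
              have hs5 : pvStatus dev ≠ "anomaly" := h5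
              have hstep : (if (PySem.Dict.mk [("normal", a), ("warning", b), ("critical", c), ("offline", d)]).contains ((PySem.Dict.mk dev).getD "status" "normal") = true then
            (PySem.Dict.mk [("normal", a), ("warning", b), ("critical", c), ("offline", d)]).modify ((PySem.Dict.mk dev).getD "status" "normal") 0 (· + 1)
          else if (PySem.Dict.mk dev).getD "status" "normal" = "anomaly" then
            (PySem.Dict.mk [("normal", a), ("warning", b), ("critical", c), ("offline", d)]).modify "critical" 0 (· + 1)
          else
            (PySem.Dict.mk [("normal", a), ("warning", b), ("critical", c), ("offline", d)]).modify "normal" 0 (· + 1))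
                  = PySem.Dict.mk [("normal", a + 1), ("warning", b), ("critical", c), ("offline", d)] := by
                generalize hgen : (PySem.Dict.mk dev).getD "status" "normal" = s at h1 h2 h3 h4 h5 ⊢
                simp [PySem.Dict.contains, PySem.Dict.modify, PySem.Dict.insert, PySem.Dict.getD, PySem.Dict.get?, h5, Ne.symm h1, Ne.symm h2, Ne.symm h3, Ne.symm h4]
              rw [hstep, ih]
              apply PySem.Dict.ext
              simp [hs2, hs3, hs4, hs5]
              all_goals omega

-- ===== VERDICT (by name: the statement is the Claim_ definition above) =====
theorem calculate_status_distribution_spec : Claim_equal_calculate_status_distribution := by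
  intro devices_data _
  unfold Spec_calculate_status_distribution calculate_status_distribution calculate_status_distribution_alt
  rw [pv_foldA]
  have hmap : List.map (fun device => (PySem.Dict.mk device).getD "status" "normal") devices_data
      = List.map pvStatus devices_data := rfl
  simp [PySem.List.count_eq, hmap, List.length_map]
  all_goals omega
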